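-- pv_equiv track=rewrite | github.com/DungeonCrawlerProject/py-dungeon-crawler | Scripts/WorldGeneration/world_generation.py | check_incident
-- ===== SOURCE A (Python) =====
-- def check_incident(edge, edges):
--     for vert in edge:
--         vertices_incident = 0
--         for _edge in edges:
--             if vert in _edge:
--                 vertices_incident += 1
--         if vertices_incident > 4:
--             return True
--     return False
-- ===== SOURCE B (Python) =====
-- def check_incident(edge, edges):
--     counts = {}
--     for _edge in edges:
--         for v in set(_edge):
--             counts[v] = counts.get(v, 0) + 1
--     return any(counts.get(v, 0) > 4 for v in edge)
-- ===== Notes on version B (the rewrite author's own statement) =====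
-- stated objective: faster
-- what changed: Replaces the per-endpoint rescan of all edges with a single pass that builds a vertex->incidence-count dictionary (adding each edge's distinct vertices) followed by O(1) lookups for the two endpoints.
import Mathlib
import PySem

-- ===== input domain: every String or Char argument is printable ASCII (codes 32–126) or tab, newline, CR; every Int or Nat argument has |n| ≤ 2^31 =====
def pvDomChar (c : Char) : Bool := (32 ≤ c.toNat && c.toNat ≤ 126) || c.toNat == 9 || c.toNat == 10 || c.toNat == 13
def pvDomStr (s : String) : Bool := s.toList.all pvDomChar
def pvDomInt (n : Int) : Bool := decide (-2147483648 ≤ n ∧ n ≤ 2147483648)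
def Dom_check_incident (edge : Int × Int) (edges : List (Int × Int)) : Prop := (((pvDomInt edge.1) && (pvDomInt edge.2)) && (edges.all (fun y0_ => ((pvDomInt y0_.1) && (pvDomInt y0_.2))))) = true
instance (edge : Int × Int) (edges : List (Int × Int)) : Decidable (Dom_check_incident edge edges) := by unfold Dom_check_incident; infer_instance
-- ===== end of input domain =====

-- B replaces A's per-endpoint rescan of all edges with one pass building a
-- vertex -> incidence-count dictionary, then two O(1) lookups (objective: faster).

-- ===== PORT A =====
-- A: for each vert of edge, count edges containing vert; return True as soon as a count exceeds 4.
def check_incident (edge : Int × Int) (edges : List (Int × Int)) : Bool :=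
  [edge.1, edge.2].any (fun vert =>
    (edges.foldl (fun acc _edge =>
      if vert = _edge.1 ∨ vert = _edge.2 then acc + 1 else acc) (0 : Int)) > 4)

-- ===== PORT B =====
-- B: one pass over edges builds counts (each edge contributes 1 per DISTINCT vertex), then looks up both endpoints.
def check_incident_alt (edge : Int × Int) (edges : List (Int × Int)) : Bool :=
  let counts : PySem.Dict Int Int :=
    edges.foldl (fun d _edge =>
      (PySem.Set.ofList [_edge.1, _edge.2]).foldl (fun d v => d.modify v 0 (· + 1)) d) PySem.Dict.empty
  [edge.1, edge.2].any (fun v => counts.getD v 0 > 4)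

-- ===== PRECONDITION & SPEC =====
def Spec_check_incident (edge : Int × Int) (edges : List (Int × Int)) (out : Bool) : Prop := out = check_incident_alt edge edges
instance (edge : Int × Int) (edges : List (Int × Int)) (out : Bool) : Decidable (Spec_check_incident edge edges out) := by unfold Spec_check_incident; infer_instance

-- ===== CLAIM (what is proved, stated in full; the proofs are below) =====
def Claim_equal_check_incident : Prop := ∀ (edge : Int × Int) (edges : List (Int × Int)), Dom_check_incident edge edges → Spec_check_incident edge edges (check_incident edge edges)

-- ===== LEMMAS AND PROOFS =====

-- A's inner loop counts the edges containing vert.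
theorem countA_eq (v : Int) (edges : List (Int × Int)) (c : Int) :
    edges.foldl (fun acc e => if v = e.1 ∨ v = e.2 then acc + 1 else acc) c
      = c + (edges.countP (fun e => v == e.1 || v == e.2) : Int) := by
  induction edges generalizing c with
  | nil => simp
  | cons e es ih =>
    simp only [List.foldl_cons, List.countP_cons, ih]
    by_cases h : v = e.1 ∨ v = e.2
    · have : (v == e.1 || v == e.2) = true := by
        rcases h with h | h <;> simp [h]
      simp [this, h]; omega
    · have : (v == e.1 || v == e.2) = false := by
        simp only [Bool.or_eq_false_iff, beq_eq_false_iff_ne]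
        exact ⟨fun h1 => h (Or.inl h1), fun h2 => h (Or.inr h2)⟩
      simp [this, h]

theorem count_ofList_pair (v a b : Int) :
    (PySem.Set.ofList [a, b]).count v = (if v = a ∨ v = b then 1 else 0) := by
  by_cases h : v = a ∨ v = b
  · rw [if_pos h]
    have hm : v ∈ PySem.Set.ofList [a, b] := by
      rw [PySem.Set.mem_ofList]; simpa using h
    exact List.count_eq_one_of_mem (PySem.Set.nodup_ofList [a, b]) hm
  · rw [if_neg h]
    refine List.count_eq_zero.mpr (fun hm => ?_)
    rw [PySem.Set.mem_ofList] at hm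
    simp only [List.mem_cons, List.not_mem_nil, or_false] at hm
    exact h hm

-- B's dictionary holds, for each vertex, the number of edges containing it.
theorem countB_eq (v : Int) (edges : List (Int × Int)) (d : PySem.Dict Int Int) :
    (edges.foldl (fun d e =>
        (PySem.Set.ofList [e.1, e.2]).foldl (fun d v => d.modify v 0 (· + 1)) d) d).getD v 0
      = d.getD v 0 + (edges.countP (fun e => v == e.1 || v == e.2) : Int) := by
  induction edges generalizing d with
  | nil => simp
  | cons e es ih =>
    simp only [List.foldl_cons, List.countP_cons, ih,
      PySem.Dict.getD_foldl_modify_add_one, count_ofList_pair]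
    by_cases h : v = e.1 ∨ v = e.2
    · have : (v == e.1 || v == e.2) = true := by
        rcases h with h | h <;> simp [h]
      simp [this, h]; omega
    · have : (v == e.1 || v == e.2) = false := by
        simp only [Bool.or_eq_false_iff, beq_eq_false_iff_ne]
        exact ⟨fun h1 => h (Or.inl h1), fun h2 => h (Or.inr h2)⟩
      simp [this, h]

-- ===== VERDICT (by name: the statement is the Claim_ definition above) =====
theorem check_incident_spec : Claim_equal_check_incident := by
  intro edge edges _
  unfold Spec_check_incident check_incident check_incident_alt
  simp only [List.any_cons, List.any_nil, countA_eq, countB_eq, zero_add]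
  simp [PySem.Dict.getD_empty]
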